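-- pv_equiv track=rewrite | github.com/byeol-hub/programmers | 프로그래머스/0/120956. 옹알이 （1）/옹알이 （1）.py | solution
-- ===== SOURCE A (Python) =====
-- def solution(babbling):
--     answer = 0
--     arr = ["aya", "ye", "woo", "ma"]
--
--     for i in babbling:
--         a = 0
--         while a < len(i):
--             arr_in = 0
--             for j in arr:
--                 if i[a:a+len(j)] == j:
--                     a += len(j)
--                     arr_in = 1
--                     break
--             if arr_in == 0:
--                 break
--         else:
--             answer += 1
--
--     return answer
-- ===== SOURCE B (Python) =====
-- TOKENS = ("aya", "ye", "woo", "ma")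
--
--
-- def _ok(w):
--     if w == "":
--         return True
--     return any(w.startswith(t) and _ok(w[len(t):]) for t in TOKENS)
--
--
-- def solution(babbling):
--     return sum(1 for w in babbling if _ok(w))
-- ===== Notes on version B (the rewrite author's own statement) =====
-- stated objective: idiomatic
-- what changed: Replaced the index-advancing while loop with flag variables by a recursive predicate that strips any matching token prefix and recurses on the rest (equivalent because the four tokens start with distinct letters), counted with a generator-expression sum.
import Mathlib
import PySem

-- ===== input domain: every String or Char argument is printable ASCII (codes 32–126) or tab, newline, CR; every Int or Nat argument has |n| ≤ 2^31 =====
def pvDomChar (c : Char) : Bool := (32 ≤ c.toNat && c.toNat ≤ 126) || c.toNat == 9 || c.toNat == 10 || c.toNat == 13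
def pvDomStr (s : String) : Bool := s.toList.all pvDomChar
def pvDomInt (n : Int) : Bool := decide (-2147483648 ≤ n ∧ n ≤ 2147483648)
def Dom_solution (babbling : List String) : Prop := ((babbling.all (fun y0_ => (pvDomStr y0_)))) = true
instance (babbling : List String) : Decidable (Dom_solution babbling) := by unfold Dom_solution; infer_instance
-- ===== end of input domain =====

-- B replaces A's index-advancing while loop with flag variables by a recursive
-- token-stripping predicate summed over the list (objective: idiomatic, same cost).

-- ===== PORT A =====
-- arr = ["aya", "ye", "woo", "ma"]; string operations are ported on code points (List Char)
def pyArr : List (List Char) := [['a','y','a'], ['y','e'], ['w','o','o'], ['m','a']]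

-- the inner `for j in arr: if i[a:a+len(j)] == j: … break`: first matching token
def firstTok (cs : List Char) (a : Int) : Option (List Char) :=
  pyArr.find? (fun j => PySem.List.slice cs (some a) (some (a + (j.length : Int))) == j)

-- the `while a < len(i)` loop; fuel only makes the recursion total (it is never
-- exhausted when fuel > len i − a, since every matched token advances a by ≥ 2)
def whileLoop (cs : List Char) (a : Int) (fuel : Nat) : Bool :=
  match fuel with
  | 0 => false
  | fuel + 1 =>
    if a < (cs.length : Int) then
      match firstTok cs a with
      | some j => whileLoop cs (a + (j.length : Int)) fuel
      | none => false        -- arr_in == 0 → break (loop-else not taken)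
    else true                -- loop-else reached: answer += 1

def solution (babbling : List String) : Int :=
  babbling.foldl
    (fun answer i => if whileLoop i.toList 0 (i.toList.length + 1) then answer + 1 else answer) 0

-- ===== PORT B =====
-- TOKENS = ("aya", "ye", "woo", "ma")
def pyTokens : List (List Char) := [['a','y','a'], ['y','e'], ['w','o','o'], ['m','a']]

-- _ok: recursive predicate stripping any matching token prefix; fuel is a totality
-- guard only (never exhausted for fuel > len cs, tokens have length ≥ 2)
def okB (fuel : Nat) (cs : List Char) : Bool :=
  match fuel with
  | 0 => false
  | fuel + 1 =>
    if cs = [] then true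
    else pyTokens.any (fun t => PySem.Chars.startswith cs t && okB fuel (cs.drop t.length))

-- sum(1 for w in babbling if _ok(w))
def solution_alt (babbling : List String) : Int :=
  babbling.foldl
    (fun acc w => if okB (w.toList.length + 1) w.toList then acc + 1 else acc) 0

-- ===== PRECONDITION & SPEC =====
def Spec_solution (babbling : List String) (out : Int) : Prop := out = solution_alt babbling
instance (babbling : List String) (out : Int) : Decidable (Spec_solution babbling out) := by unfold Spec_solution; infer_instance

-- ===== CLAIM (what is proved, stated in full; the proofs are below) =====
def Claim_equal_solution : Prop := ∀ (babbling : List String), Dom_solution babbling → Spec_solution babbling (solution babbling)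

-- ===== LEMMAS AND PROOFS =====

-- A's scan from position a and B's recursion on the suffix agree: at any position at
-- most one token can match (the tokens begin with distinct letters), so the greedy
-- commit of A equals the disjunction of B.
theorem loop_eq_ok : ∀ (f1 : Nat) (f2 : Nat) (cs : List Char) (a : Nat),
    cs.length - a < f1 → cs.length - a < f2 →
    whileLoop cs (a : Int) f1 = okB f2 (cs.drop a) := by
  intro f1
  induction f1 with
  | zero => intro f2 cs a h1 _; exact absurd h1 (Nat.not_lt_zero _)
  | succ k ih =>
    intro f2 cs a h1 h2
    obtain ⟨m, rfl⟩ : ∃ m, f2 = m + 1 := ⟨f2 - 1, by omega⟩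
    unfold whileLoop okB
    by_cases hlt : (a : Int) < cs.length
    · have ha : a < cs.length := by exact_mod_cast hlt
      have hrest : cs.drop a ≠ [] := by simp [List.drop_eq_nil_iff]; omega
      obtain ⟨c, rs, hcr⟩ := List.exists_cons_of_ne_nil hrest
      simp only [hlt, if_pos, hcr, if_neg (List.cons_ne_nil c rs)]
      simp only [firstTok, pyArr, pyTokens, List.find?, List.any_cons, List.any_nil]
      have hsl : ∀ t : List Char,
          PySem.List.slice cs (some (a:Int)) (some ((a:Int) + (t.length : Int))) = (c::rs).take t.length := by
        intro t
        rw [PySem.List.slice_natCast_add, hcr]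
      have hsw : ∀ t : List Char,
          PySem.Chars.startswith (c::rs) t = ((c::rs).take t.length == t) := by
        intro t
        by_cases hp : t <+: (c :: rs)
        · have h2 : (c::rs).take t.length = t := (List.prefix_iff_eq_take.mp hp).symm
          simp [(PySem.Chars.startswith_iff (c::rs) t).mpr hp, h2]
        · have h1 : PySem.Chars.startswith (c::rs) t = false :=
            Bool.eq_false_iff.mpr (fun h => hp ((PySem.Chars.startswith_iff _ _).mp h))
          have h2 : (c::rs).take t.length ≠ t := fun h => hp (List.prefix_iff_eq_take.mpr h.symm)
          simp [h1, h2]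
      have hd3 : List.drop (a + 3) cs = List.drop 2 rs := by
        rw [← List.drop_drop, hcr]; simp
      have hd2 : List.drop (a + 2) cs = rs.tail := by
        rw [← List.drop_drop, hcr]; simp
      have hb3' : whileLoop cs ((a:Int) + 3) k = okB m (List.drop 2 rs) := by
        rw [show ((a:Int) + 3) = (((a + 3 : Nat)):Int) by push_cast; ring, ← hd3]
        exact ih m cs (a + 3) (by omega) (by omega)
      have hb2' : whileLoop cs ((a:Int) + 2) k = okB m rs.tail := by
        rw [show ((a:Int) + 2) = (((a + 2 : Nat)):Int) by push_cast; ring, ← hd2]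
        exact ih m cs (a + 2) (by omega) (by omega)
      simp only [hsl, hsw]
      by_cases hc1 : c = 'a'
      · subst hc1
        by_cases hp : List.take 2 rs = ['y','a']
        · simp [hp, hb3']
        · simp [beq_eq_false_iff_ne.mpr hp]
      · by_cases hc2 : c = 'y'
        · subst hc2
          by_cases hp : List.take 1 rs = ['e']
          · simp [hp, hb2']
          · simp [beq_eq_false_iff_ne.mpr hp]
        · by_cases hc3 : c = 'w'
          · subst hc3
            by_cases hp : List.take 2 rs = ['o','o']
            · simp [hp, hb3']
            · simp [beq_eq_false_iff_ne.mpr hp]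
          · by_cases hc4 : c = 'm'
            · subst hc4
              by_cases hp : List.take 1 rs = ['a']
              · simp [hp, hb2']
              · simp [beq_eq_false_iff_ne.mpr hp]
            · simp [beq_eq_false_iff_ne.mpr hc1, beq_eq_false_iff_ne.mpr hc2, beq_eq_false_iff_ne.mpr hc3, beq_eq_false_iff_ne.mpr hc4]
    · have ha : cs.length ≤ a := by omega
      simp [hlt, List.drop_eq_nil_iff.mpr (by omega)]

theorem word_eq (w : String) :
    whileLoop w.toList 0 (w.toList.length + 1) = okB (w.toList.length + 1) w.toList := by
  have h := loop_eq_ok (w.toList.length + 1) (w.toList.length + 1) w.toList 0 (by omega) (by omega)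
  simpa using h

-- ===== VERDICT (by name: the statement is the Claim_ definition above) =====
theorem solution_spec : Claim_equal_solution := by
  intro babbling _
  unfold Spec_solution solution solution_alt
  congr 1
  funext acc w
  rw [word_eq]
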